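-- pv_equiv track=rewrite | github.com/dhvani-gupta/Practise | PractiseQ1.py | func
-- ===== SOURCE A (Python) =====
-- def func(N):
--     if N == 0:
--         return "a"
--     elif N == 1:
--         return "b"
--     elif N == 2:
--         return "c"
--     else:
--         return func(N - 1) + func(N - 2) + func(N - 3)
-- ===== SOURCE B (Python) =====
-- def func(N):
--     if N < 0:
--         raise ValueError("N must be non-negative")
--     a, b, c = "a", "b", "c"
--     if N == 0:
--         return a
--     if N == 1:
--         return b
--     for _ in range(N - 2):
--         a, b, c = b, c, c + b + a
--     return c
-- ===== Notes on version B (the rewrite author's own statement) =====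
-- stated objective: alternative
-- what changed: Replaces the exponential triple recursion with a bottom-up loop keeping only the last three strings, so each string is built once (the output itself is exponentially long, so large N remain infeasible for both).
import Mathlib
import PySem

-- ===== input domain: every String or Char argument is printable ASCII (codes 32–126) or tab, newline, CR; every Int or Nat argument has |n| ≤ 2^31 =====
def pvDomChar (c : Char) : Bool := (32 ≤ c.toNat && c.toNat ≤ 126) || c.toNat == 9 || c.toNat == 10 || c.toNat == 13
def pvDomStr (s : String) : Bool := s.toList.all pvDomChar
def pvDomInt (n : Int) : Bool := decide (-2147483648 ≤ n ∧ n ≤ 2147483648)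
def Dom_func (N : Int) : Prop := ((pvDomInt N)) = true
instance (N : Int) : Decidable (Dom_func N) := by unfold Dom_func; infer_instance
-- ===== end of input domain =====

-- B replaces A's recursive triple concatenation by a bottom-up loop keeping the last three strings (objective: alternative).


-- ===== PORT A =====
-- Literal transliteration of A's recursion; the 'if 3 ≤ N' guard only makes the
-- recursion total (for N < 0 Python A recurses forever / raises; excluded by Pre_).
def func (N : Int) : String :=
  if N == 0 then "a"
  else if N == 1 then "b"
  else if N == 2 then "c"
  else if h : 3 ≤ N then
    have h1 : (N - 1).toNat < N.toNat := by omega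
    have h2 : (N - 2).toNat < N.toNat := by omega
    have h3 : (N - 3).toNat < N.toNat := by omega
    func (N - 1) ++ func (N - 2) ++ func (N - 3)
  else ""
termination_by N.toNat

-- ===== PORT B =====
def func_alt (N : Int) : String :=
  if N < 0 then ""  -- Python B raises ValueError here (outside Pre_); the port needs a value of the type
  else if N == 0 then "a"
  else if N == 1 then "b"
  else
    ((PySem.List.pyRange 0 (N - 2) 1).foldl
      (fun (st : String × String × String) _ => (st.2.1, st.2.2, st.2.2 ++ st.2.1 ++ st.1))
      ("a", "b", "c")).2.2

-- ===== PRECONDITION & SPEC =====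
-- Pre_ excludes N < 0, where Python A recurses without a base case and raises RecursionError.
def Pre_func (N : Int) : Prop := 0 ≤ N
instance (N : Int) : Decidable (Pre_func N) := by unfold Pre_func; infer_instance
def pvWitness_func : Int := 5

def Spec_func (N : Int) (out : String) : Prop := out = func_alt N
instance (N : Int) (out : String) : Decidable (Spec_func N out) := by unfold Spec_func; infer_instance

-- ===== CLAIM (what is proved, stated in full; the proofs are below) =====
def Claim_equal_func : Prop := ∀ (N : Int), Dom_func N → Pre_func N → Spec_func N (func N)

-- ===== LEMMAS AND PROOFS =====

-- the mathematical sequence both ports compute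
def F : Nat → String
  | 0 => "a"
  | 1 => "b"
  | 2 => "c"
  | n + 3 => F (n + 2) ++ F (n + 1) ++ F n

theorem func_eq_F : ∀ n : Nat, func (n : Int) = F n := by
  intro n
  induction n using F.induct with
  | case1 => simp [func, F]
  | case2 => simp [func, F]
  | case3 => simp [func, F]
  | case4 n ih2 ih1 ih0 =>
    rw [func]
    have e1 : (n : Int) + 2 + 1 - 1 = ((n + 2 : Nat) : Int) := by omega
    have e2 : (n : Int) + 2 + 1 - 2 = ((n + 1 : Nat) : Int) := by omega
    have e3 : (n : Int) + 2 + 1 - 3 = ((n : Nat) : Int) := by omega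
    have h0 : (((n : Nat) + 3 : Nat) : Int) ≠ 0 := by omega
    have h1 : (((n : Nat) + 3 : Nat) : Int) ≠ 1 := by omega
    have h2 : (((n : Nat) + 3 : Nat) : Int) ≠ 2 := by omega
    have h3 : (3 : Int) ≤ ((n + 3 : Nat) : Int) := by omega
    simp only [beq_iff_eq, h0, h1, h2, h3, dif_pos]
    push_cast
    rw [e1, e2, e3, ih2, ih1, ih0]
    rfl

theorem loop_inv (k : Nat) :
    (List.range k).foldl
      (fun (st : String × String × String) _ => (st.2.1, st.2.2, st.2.2 ++ st.2.1 ++ st.1))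
      ("a", "b", "c") = (F k, F (k + 1), F (k + 2)) := by
  induction k with
  | zero => rfl
  | succ k ih =>
    rw [List.range_succ, List.foldl_append, ih]
    show (F (k + 1), F (k + 2), F (k + 2) ++ F (k + 1) ++ F k) = _
    rw [show F (k + 3) = F (k + 2) ++ F (k + 1) ++ F k from rfl]

-- ===== VERDICT (by name: the statement is the Claim_ definition above) =====
theorem func_spec : Claim_equal_func := by
  intro N _ hpre
  unfold Spec_func func_alt
  obtain ⟨n, rfl⟩ := Int.eq_ofNat_of_zero_le hpre
  have hneg : ¬ ((n : Int) < 0) := by omega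
  rw [if_neg hneg]
  rcases n with _ | _ | k
  · rw [func]; norm_num
  · rw [func]; norm_num
  · have h0 : (((k : Nat) + 2 : Nat) : Int) ≠ 0 := by omega
    have h1 : (((k : Nat) + 2 : Nat) : Int) ≠ 1 := by omega
    simp only [beq_iff_eq, h0, h1]
    have hr : (((k + 2 : Nat) : Int) - 2) = (k : Int) := by omega
    rw [hr, PySem.List.pyRange_one, List.foldl_map]
    have : ((k : Int) - 0).toNat = k := by omega
    rw [this, loop_inv, func_eq_F]
    simp
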